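-- pv_equiv track=rewrite | github.com/cemasma/keras-turkey-super-league | data.py | get_data_as_matrix
-- ===== SOURCE A (Python) =====
-- def get_data_as_matrix(data):
--     """Turns data array to the matrix"""
--     matrix = []
--     for data_part in data:
--         data_arr = []
--         i = 0
--         for j in range(0, len(data_part)):
--             for column in data_part:
--                 data_arr.append(data_part[column][j])
--                 i = i + 1
--                 if i % 3 == 0:
--                     matrix.append(data_arr)
--                     data_arr = []
--     return matrix
-- ===== SOURCE B (Python) =====
-- def get_data_as_matrix(data):
--     """Turns data array to the matrix"""
--     matrix = []
--     for data_part in data: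
--         flat = [data_part[column][j]
--                 for j in range(0, len(data_part))
--                 for column in data_part]
--         k = 0
--         while k + 3 <= len(flat):
--             matrix.append(flat[k:k + 3])
--             k = k + 3
--     return matrix
-- ===== Notes on version B (the rewrite author's own statement) =====
-- stated objective: alternative
-- what changed: B separates flattening from grouping: it builds the whole row-major flat value list of a data_part with one comprehension and then slices it into consecutive 3-element chunks, instead of A's single interleaved loop that counts appends with a running i%3 counter and flushes a growing buffer.
import Mathlib
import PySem

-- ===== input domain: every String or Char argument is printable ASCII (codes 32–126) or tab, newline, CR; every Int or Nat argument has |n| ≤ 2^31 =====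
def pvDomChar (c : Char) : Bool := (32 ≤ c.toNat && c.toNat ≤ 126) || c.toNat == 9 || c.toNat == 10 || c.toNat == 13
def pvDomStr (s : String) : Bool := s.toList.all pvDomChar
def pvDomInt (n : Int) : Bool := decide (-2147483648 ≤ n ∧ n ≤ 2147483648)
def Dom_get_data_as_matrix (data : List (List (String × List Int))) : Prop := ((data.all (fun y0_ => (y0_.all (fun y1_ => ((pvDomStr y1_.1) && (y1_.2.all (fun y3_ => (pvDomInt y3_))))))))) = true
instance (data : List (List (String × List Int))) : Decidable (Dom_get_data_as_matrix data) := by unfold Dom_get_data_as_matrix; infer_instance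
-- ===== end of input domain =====

-- B separates flattening from chunking (flat comprehension + slicing into 3s) instead of A's
-- interleaved loop with a running i%3 counter and flush buffer: a different decomposition, same cost.

-- ===== PORT A =====
-- data_part[column][j] : dict lookup (first match) then index; Pre_ keeps j in range, so the
-- getD defaults are never reached on admitted inputs.
def pvVal (part : List (String × List Int)) (j : Int) (col : String × List Int) : Int :=
  (PySem.List.pyGet? ((PySem.Dict.get? (PySem.Dict.mk part) col.1).getD []) j).getD 0

-- the body of A's innermost loop: append the value, bump i, flush data_arr when i % 3 == 0
-- (i stays ≥ 0, so Lean's `% 3` agrees with Python's `% 3`)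
def pvStepA (part : List (String × List Int)) (j : Int)
    (st : List (List Int) × List Int × Int) (col : String × List Int) :
    List (List Int) × List Int × Int :=
  let data_arr := st.2.1 ++ [pvVal part j col]
  let i := st.2.2 + 1
  if i % 3 == 0 then (st.1 ++ [data_arr], ([], i)) else (st.1, (data_arr, i))

def get_data_as_matrix (data : List (List (String × List Int))) : List (List Int) :=
  data.foldl
    (fun matrix part =>
      ((PySem.List.pyRange 0 part.length 1).foldl
          (fun st j => part.foldl (pvStepA part j) st)
          (matrix, ([], 0))).1)
    []

-- ===== PORT B =====
-- flat = [part[column][j] for j in range(len(part)) for column in part]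
def pvFlat (part : List (String × List Int)) : List Int :=
  (PySem.List.pyRange 0 part.length 1).flatMap (fun j => part.map (pvVal part j))

-- the `while k + 3 <= len(flat): append flat[k:k+3]; k += 3` loop, as the equivalent
-- 3-step structural recursion on the not-yet-sliced suffix (flat[k:k+3] = next three elements)
def pvChunk3 : List Int → List (List Int)
  | a :: b :: c :: t => [a, b, c] :: pvChunk3 t
  | _ => []

def get_data_as_matrix_alt (data : List (List (String × List Int))) : List (List Int) :=
  data.foldl (fun matrix part => matrix ++ pvChunk3 (pvFlat part)) []

-- ===== PRECONDITION & SPEC =====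
-- Pre_ excludes (a) data_parts with duplicate keys — the Python input is a dict, which collapses
-- duplicates, so an association list with repeated keys does not denote the dict A sees — and
-- (b) data_parts in which some column list is shorter than the number of columns, where A raises
-- IndexError on data_part[column][j].
-- Bool-valued key-distinctness check (kernel-evaluable)
def pvKeysNodup : List String → Bool
  | [] => true
  | k :: t => !(t.contains k) && pvKeysNodup t

def Pre_get_data_as_matrix (data : List (List (String × List Int))) : Prop :=
  (data.all (fun part =>
    pvKeysNodup (part.map Prod.fst) &&
    part.all (fun p => decide (part.length ≤ p.2.length)))) = true
instance (data : List (List (String × List Int))) : Decidable (Pre_get_data_as_matrix data) := by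
  unfold Pre_get_data_as_matrix; infer_instance

def pvWitness_get_data_as_matrix : (List (List (String × List Int))) :=
  [[("a", [1, 2]), ("b", [3, 4])], [("c", [5])]]

def Spec_get_data_as_matrix (data : List (List (String × List Int))) (out : List (List Int)) : Prop := out = get_data_as_matrix_alt data
instance (data : List (List (String × List Int))) (out : List (List Int)) : Decidable (Spec_get_data_as_matrix data out) := by unfold Spec_get_data_as_matrix; infer_instance

-- ===== CLAIM (what is proved, stated in full; the proofs are below) =====
def Claim_equal_get_data_as_matrix : Prop := ∀ (data : List (List (String × List Int))), Dom_get_data_as_matrix data → Pre_get_data_as_matrix data → Spec_get_data_as_matrix data (get_data_as_matrix data)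

-- ===== LEMMAS AND PROOFS =====

-- A's step, seen as a function of the appended value only
def pvStep (st : List (List Int) × List Int × Int) (v : Int) :
    List (List Int) × List Int × Int :=
  let data_arr := st.2.1 ++ [v]
  let i := st.2.2 + 1
  if i % 3 == 0 then (st.1 ++ [data_arr], ([], i)) else (st.1, (data_arr, i))

theorem pvChunk3_short (da : List Int) (h : da.length < 3) : pvChunk3 da = [] := by
  match da with
  | [] => rfl
  | [_] => rfl
  | [_, _] => rfl
  | _ :: _ :: _ :: _ =>
    exfalso
    simp only [List.length_cons] at h
    omega

theorem foldl_flatMap {α β σ : Type} (g : α → List β) (f : σ → β → σ) :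
    ∀ (L : List α) (s : σ), (L.flatMap g).foldl f s = L.foldl (fun s a => (g a).foldl f s) s := by
  intro L
  induction L with
  | nil => intro s; rfl
  | cons x t ih => intro s; simp [List.flatMap_cons, List.foldl_append, ih]

theorem pvChunk_inv (l : List Int) :
    ∀ (m : List (List Int)) (da : List Int) (i : Int),
      da.length < 3 → i % 3 = (da.length : Int) →
      (l.foldl pvStep (m, (da, i))).1 = m ++ pvChunk3 (da ++ l) := by
  induction l with
  | nil =>
    intro m da i hlen _
    simp [pvChunk3_short da hlen]
  | cons v t ih =>
    intro m da i hlen hmod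
    by_cases hc : (i + 1) % 3 = 0
    · -- flush: da must have exactly 2 elements
      have hda2 : da.length = 2 := by omega
      match da, hda2 with
      | [a, b], _ =>
        have hstep : pvStep (m, ([a, b], i)) v = (m ++ [[a, b, v]], ([], i + 1)) := by
          simp [pvStep, hc]
        rw [List.foldl_cons, hstep, ih (m ++ [[a, b, v]]) [] (i + 1) (by simp) (by simpa using hc)]
        simp [pvChunk3]
    · -- no flush
      have hda : da.length ≤ 1 := by omega
      have hstep : pvStep (m, (da, i)) v = (m, (da ++ [v], i + 1)) := by
        simp [pvStep, hc]
      rw [List.foldl_cons, hstep,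
        ih m (da ++ [v]) (i + 1) (by simp; omega) (by simp; omega)]
      simp

theorem pvPart_eq (part : List (String × List Int)) (matrix : List (List Int)) :
    ((PySem.List.pyRange 0 part.length 1).foldl
        (fun st j => part.foldl (pvStepA part j) st) (matrix, (([] : List Int), (0 : Int)))).1
      = matrix ++ pvChunk3 (pvFlat part) := by
  have hfun : (fun (st : List (List Int) × List Int × Int) (j : Int) =>
        part.foldl (pvStepA part j) st)
      = (fun st j => (part.map (pvVal part j)).foldl pvStep st) := by
    funext st j
    rw [List.foldl_map]
    rfl
  rw [hfun, ← foldl_flatMap]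
  simpa [pvFlat] using
    pvChunk_inv ((PySem.List.pyRange 0 part.length 1).flatMap fun j => part.map (pvVal part j))
      matrix [] 0 (by simp) (by simp)

-- ===== VERDICT (by name: the statement is the Claim_ definition above) =====
theorem get_data_as_matrix_spec : Claim_equal_get_data_as_matrix := by
  intro data _ _
  show get_data_as_matrix data = get_data_as_matrix_alt data
  unfold get_data_as_matrix get_data_as_matrix_alt
  simp only [pvPart_eq]
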